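-- pv_equiv track=rewrite | github.com/glovguy/advent_of_code | 2019/day4.py | meets_criteria_part2
-- ===== SOURCE A (Python) =====
-- def meets_criteria_part2(num):
--     stringNum = str(num)
--     hasDouble = False
--     for i in range(0, len(str(num))):
--         isLastDigit = (i == len(str(num))-1)
--         isSecondToLastDigit = (i == len(str(num))-2)
--         dbl = ( isLastDigit or int(stringNum[i]) == int(stringNum[i+1]) )
--         lftNot = (i == 0 or int(stringNum[i-1]) != int(stringNum[i]) )
--         rgtNot = (isSecondToLastDigit) or (not isLastDigit and int(stringNum[i+1]) != int(stringNum[i+2]) )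
--         if not isLastDigit and int(stringNum[i]) > int(stringNum[i+1]):
--             return False
--         if dbl and lftNot and rgtNot:
--             hasDouble = True
--     return hasDouble
-- ===== SOURCE B (Python) =====
-- def meets_criteria_part2(num):
--     digits = [int(c) for c in str(num)]
--     if any(a > b for a, b in zip(digits, digits[1:])):
--         return False
--     runs = []
--     for d in digits:
--         if runs and runs[-1][0] == d:
--             runs[-1][1] += 1
--         else:
--             runs.append([d, 1])
--     return any(n == 2 for _, n in runs)
-- ===== Notes on version B (the rewrite author's own statement) =====
-- stated objective: simpler
-- what changed: Replaces A's per-index dbl/lftNot/rgtNot boundary logic and repeated str/int re-evaluation with one digit list, a pairwise zip monotonicity check, and explicit run-length grouping tested for a run of exactly 2.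
import Mathlib
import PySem

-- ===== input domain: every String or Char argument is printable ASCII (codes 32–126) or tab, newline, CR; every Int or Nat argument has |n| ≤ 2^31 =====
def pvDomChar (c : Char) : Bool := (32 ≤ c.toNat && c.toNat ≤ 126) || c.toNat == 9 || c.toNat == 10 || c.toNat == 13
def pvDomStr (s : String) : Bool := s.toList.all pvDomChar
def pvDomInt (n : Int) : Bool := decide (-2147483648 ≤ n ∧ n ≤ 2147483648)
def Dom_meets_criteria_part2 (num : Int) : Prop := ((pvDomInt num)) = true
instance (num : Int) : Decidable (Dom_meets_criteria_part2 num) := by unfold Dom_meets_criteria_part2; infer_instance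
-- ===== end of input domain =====

-- B replaces A's per-index boundary logic (dbl/lftNot/rgtNot) with a digit list, a pairwise
-- monotonicity check and explicit run-length grouping (objective: simpler).

-- ===== PORT A =====
-- int(stringNum[i]) on one character; on Pre_ (num ≥ 0) every character of str(num) is a digit,
-- so ofStr? is always `some` and the `.getD 0` default is unreachable.
def pvDig (c : Char) : Int := (PySem.Int.ofStr? (String.mk [c])).getD 0

def pvDigAt (s : List Char) (i : Int) : Int := ((PySem.List.pyGet? s i).map pvDig).getD 0

def pvLoopA (s : List Char) (i : Nat) (hasDouble : Bool) : Bool :=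
  if _h : i < s.length then
    let isLastDigit := ((i : Int) == (s.length : Int) - 1)
    let isSecondToLastDigit := ((i : Int) == (s.length : Int) - 2)
    let dbl := isLastDigit || (pvDigAt s i == pvDigAt s ((i : Int) + 1))
    let lftNot := (i == 0) || (pvDigAt s ((i : Int) - 1) != pvDigAt s i)
    let rgtNot := isSecondToLastDigit || (!isLastDigit && (pvDigAt s ((i : Int) + 1) != pvDigAt s ((i : Int) + 2)))
    if !isLastDigit && decide (pvDigAt s i > pvDigAt s ((i : Int) + 1)) then false
    else pvLoopA s (i + 1) (if dbl && lftNot && rgtNot then true else hasDouble)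
  else hasDouble
termination_by s.length - i

def meets_criteria_part2 (num : Int) : Bool :=
  pvLoopA (PySem.Int.toStr num).toList 0 false

-- ===== PORT B =====
def pvDigits (num : Int) : List Int := (PySem.Int.toStr num).toList.map pvDig

-- Source B grows/updates the LAST run of `runs`; the port keeps the current run at the HEAD
-- (the same runs in reverse order), which does not affect the final `any` test.
def pvRunStep (runs : List (Int × Int)) (d : Int) : List (Int × Int) :=
  match runs with
  | (d0, n) :: rest => if d0 == d then (d0, n + 1) :: rest else (d, 1) :: (d0, n) :: rest
  | [] => [(d, 1)]

def meets_criteria_part2_alt (num : Int) : Bool :=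
  let digits := pvDigits num
  if (digits.zip (digits.drop 1)).any (fun p => decide (p.1 > p.2)) then false
  else (digits.foldl pvRunStep []).any (fun p => p.2 == 2)

-- ===== PRECONDITION & SPEC =====
-- Pre_ excludes negative num, where str(num) contains a minus sign and int of that character raises ValueError in A (and in B).
def Pre_meets_criteria_part2 (num : Int) : Prop := 0 ≤ num
instance (num : Int) : Decidable (Pre_meets_criteria_part2 num) := by unfold Pre_meets_criteria_part2; infer_instance
def pvWitness_meets_criteria_part2 : Int := 22

def Spec_meets_criteria_part2 (num : Int) (out : Bool) : Prop := out = meets_criteria_part2_alt num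
instance (num : Int) (out : Bool) : Decidable (Spec_meets_criteria_part2 num out) := by unfold Spec_meets_criteria_part2; infer_instance

-- ===== CLAIM (what is proved, stated in full; the proofs are below) =====
def Claim_equal_meets_criteria_part2 : Prop := ∀ (num : Int), Dom_meets_criteria_part2 num → Pre_meets_criteria_part2 num → Spec_meets_criteria_part2 num (meets_criteria_part2 num)

-- ===== LEMMAS AND PROOFS =====

-- structural shadow of A's loop over the digit list, with `prev` = digit left of the cursor
def pvCond (prev : Option Int) (a : Int) (t : List Int) : Bool :=
  let dbl := t.isEmpty || (a == t.headD 0)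
  let lftNot := prev != some a
  let rgtNot := match t with
    | [] => false
    | [_] => true
    | b :: c :: _ => b != c
  dbl && lftNot && rgtNot

def pvAux (prev : Option Int) (l : List Int) (hd : Bool) : Bool :=
  match l with
  | [] => hd
  | a :: t =>
    if !t.isEmpty && decide (a > t.headD 0) then false
    else pvAux (some a) t (if pvCond prev a t then true else hd)

def pvHasDec : List Int → Bool
  | a :: b :: t => decide (a > b) || pvHasDec (b :: t)
  | _ => false

def pvEx2 (prev : Option Int) : List Int → Bool
  | [] => false
  | a :: t => pvCond prev a t || pvEx2 (some a) t

def pvG (d0 n : Int) : List Int → Bool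
  | [] => (n == 2)
  | d :: t => if d == d0 then pvG d0 (n + 1) t else (n == 2) || pvG d 1 t

def pvCL (d0 : Int) : List Int → Int
  | [] => 0
  | d :: t => if d == d0 then 1 + pvCL d0 t else 0

-- digit-extraction facts used by the bridge
theorem pv_getD (s : List Char) (j : Nat) (hj : j < s.length) :
    pvDigAt s (j : Int) = (s.map pvDig).getD j 0 := by
  simp [pvDigAt, List.getD, List.getElem?_eq_getElem (show j < s.length from hj)]

theorem pv_dropc (s : List Char) (j : Nat) (hj : j < s.length) :
    (s.map pvDig).drop j = pvDigAt s (j : Int) :: (s.map pvDig).drop (j + 1) := by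
  rw [List.drop_eq_getElem_cons (show j < (s.map pvDig).length by simpa using hj)]
  rw [pv_getD s j hj]
  congr 1
  simp [List.getD, List.getElem?_eq_getElem (show j < (s.map pvDig).length by simpa using hj)]

-- (L1) A's index loop equals the structural shadow
theorem pvAux_cons (prev : Option Int) (a : Int) (t : List Int) (hd : Bool) :
    pvAux prev (a :: t) hd
      = if !t.isEmpty && decide (a > t.headD 0) then false
        else pvAux (some a) t (if pvCond prev a t then true else hd) := rfl

theorem pvAux_nil (prev : Option Int) (hd : Bool) : pvAux prev [] hd = hd := rfl

theorem pvLoopA_eq_aux (s : List Char) (i : Nat) (hd : Bool) (hle : i ≤ s.length) :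
    pvLoopA s i hd
      = pvAux (if i = 0 then none else some (pvDigAt s ((i : Int) - 1))) ((s.map pvDig).drop i) hd := by
  by_cases hlt : i < s.length
  · have key : ∀ hb, pvLoopA s (i + 1) hb
        = pvAux (some (pvDigAt s (i : Int))) ((s.map pvDig).drop (i + 1)) hb := by
      intro hb
      rw [pvLoopA_eq_aux s (i + 1) hb (by omega)]
      have hc : ((i + 1 : Nat) : Int) - 1 = (i : Int) := by push_cast; ring
      simp [hc]
    have hLft : ((i == 0) || (pvDigAt s ((i : Int) - 1) != pvDigAt s (i : Int)))
        = ((if i = 0 then none else some (pvDigAt s ((i : Int) - 1))) != some (pvDigAt s (i : Int))) := by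
      by_cases h0 : i = 0
      · simp [h0]
      · have hb0 : (i == 0) = false := by simpa using h0
        simp [h0, hb0, bne]
    rw [pvLoopA, dif_pos hlt]
    simp only [key]
    rw [pv_dropc s i hlt]
    rcases lt_trichotomy (i + 1) s.length with h1 | h1 | h1
    · have hLast : (((i : Nat) : Int) == (s.length : Int) - 1) = false := by simp; omega
      rw [pv_dropc s (i + 1) (by omega)]
      have hc1 : ((i + 1 : Nat) : Int) = (i : Int) + 1 := by push_cast; ring
      rw [hc1]
      rcases lt_trichotomy (i + 1 + 1) s.length with h2 | h2 | h2
      · have hSec : (((i : Nat) : Int) == (s.length : Int) - 2) = false := by simp; omega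
        rw [pv_dropc s (i + 1 + 1) (by omega)]
        have hc2 : ((i + 1 + 1 : Nat) : Int) = (i : Int) + 2 := by push_cast; ring
        rw [hc2]
        simp only [pvAux_cons, pvCond, hLast, hSec, hLft, List.isEmpty_cons, List.headD_cons,
          Bool.not_false, Bool.true_and, Bool.false_or]
        congr 1
      · have hSec : (((i : Nat) : Int) == (s.length : Int) - 2) = true := by simp; omega
        have hnil : (s.map pvDig).drop (i + 1 + 1) = [] :=
          List.drop_eq_nil_of_le (by simpa using (by omega : s.length ≤ i + 1 + 1))
        rw [hnil]
        simp only [pvAux_cons, pvAux_nil, pvCond, hLast, hSec, hLft, List.isEmpty_cons,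
          List.isEmpty_nil, List.headD_cons, Bool.not_false, Bool.not_true, Bool.true_and,
          Bool.false_and, Bool.false_or, Bool.true_or, Bool.and_true, Bool.and_false,
          Bool.false_eq_true, if_false]
        rfl
      · omega
    · have hLast : (((i : Nat) : Int) == (s.length : Int) - 1) = true := by simp; omega
      have hSec : (((i : Nat) : Int) == (s.length : Int) - 2) = false := by simp; omega
      have hnil : (s.map pvDig).drop (i + 1) = [] :=
        List.drop_eq_nil_of_le (by simpa using (by omega : s.length ≤ i + 1))
      rw [hnil]
      simp only [pvAux_cons, pvAux_nil, pvCond, hLast, hSec, hLft, List.isEmpty_cons,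
        List.isEmpty_nil, List.headD_cons, Bool.not_false, Bool.not_true, Bool.true_and,
        Bool.false_and, Bool.false_or, Bool.true_or, Bool.and_true, Bool.and_false,
        Bool.false_eq_true, if_false]
    · omega
  · have hi : s.length ≤ i := by omega
    rw [pvLoopA, dif_neg hlt, List.drop_eq_nil_of_le (by simpa using hi)]
    rfl
termination_by s.length - i

-- (L2) the shadow = early-false on a decrease, else OR over positions
theorem pvAux_eq (l : List Int) : ∀ (prev : Option Int) (hd : Bool),
    pvAux prev l hd = if pvHasDec l then false else hd || pvEx2 prev l := by
  intro prev hd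
  induction l generalizing prev hd with
  | nil => simp [pvAux, pvHasDec, pvEx2]
  | cons a t ih =>
    have step : pvAux prev (a :: t) hd
        = if !t.isEmpty && decide (a > t.headD 0) then false
          else pvAux (some a) t (if pvCond prev a t then true else hd) := rfl
    rw [step, ih]
    match t with
    | [] => simp [pvHasDec, pvEx2, pvAux, Bool.or_comm]
    | b :: t' =>
      by_cases hab : a > b
      · simp [pvHasDec, hab]
      · have hdec : pvHasDec (a :: b :: t') = pvHasDec (b :: t') := by
          simp [pvHasDec, hab]
        simp only [List.isEmpty_cons, List.headD_cons, Bool.not_false, Bool.true_and, hdec, pvEx2]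
        split
        · next hcond => exact absurd (by simpa using hcond) hab
        · split
          · rfl
          · cases hc : pvCond prev a (b :: t') <;> cases hd <;>
              simp [Bool.or_comm, Bool.or_assoc, Bool.or_left_comm]

-- (Mc) at a fresh run start, A's condition says "this run has length exactly 2"
theorem pvCL_nonneg (d : Int) (t : List Int) : 0 ≤ pvCL d t := by
  induction t with
  | nil => simp [pvCL]
  | cons a t ih => simp only [pvCL]; split <;> omega

theorem pvCond_fresh (prev : Option Int) (d : Int) (t : List Int) (h : prev ≠ some d) :
    pvCond prev d t = decide ((1 + pvCL d t) = 2) := by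
  match t with
  | [] => simp [pvCond, pvCL]
  | [b] =>
    by_cases hb : d = b
    · subst hb; simp [pvCond, pvCL, h]
    · simp [pvCond, pvCL, hb, Ne.symm hb]
  | b :: c :: t' =>
    by_cases hb : d = b
    · subst hb
      by_cases hc : d = c
      · subst hc
        have := pvCL_nonneg d t'
        simp only [pvCond, pvCL, List.isEmpty_cons, List.headD_cons, bne_self_eq_false]
        simp [h]; omega
      · simp [pvCond, pvCL, hc, Ne.symm hc, bne, h]
    · simp [pvCond, pvCL, hb, Ne.symm hb]

-- (M) run-length counting = A's positional condition
theorem pvG_eq (t : List Int) : ∀ (d0 n : Int),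
    pvG d0 n t = ((decide ((n + pvCL d0 t) = 2)) || pvEx2 (some d0) t) := by
  intro d0 n
  induction t generalizing d0 n with
  | nil =>
    simp only [pvG, pvCL, pvEx2, Bool.or_false]
    rw [Bool.eq_iff_iff]; simp
  | cons d t ih =>
    simp only [pvG, pvEx2]
    by_cases h : d = d0
    · subst h
      have hcl : pvCL d (d :: t) = 1 + pvCL d t := by simp [pvCL]
      have hc : pvCond (some d) d t = false := by simp [pvCond]
      rw [if_pos (by simp : (d == d) = true), ih]
      simp only [hcl, hc, Bool.false_or]
      simp only [show n + (1 + pvCL d t) = n + 1 + pvCL d t from by ring]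
    · have hcl : pvCL d0 (d :: t) = 0 := by simp [pvCL, h]
      rw [if_neg (by simp [h] : ¬ (d == d0) = true), ih,
        pvCond_fresh (some d0) d t (by simp [Ne.symm h])]
      simp only [hcl, Int.add_zero]
      have hn : (n == 2) = decide (n = 2) := by rw [Bool.eq_iff_iff]; simp
      rw [hn]

-- (R) Source B's runs fold = run-length counting
theorem pvFold_eq (t : List Int) : ∀ (d0 n : Int) (rest : List (Int × Int)),
    ((List.foldl pvRunStep ((d0, n) :: rest) t).any (fun p => p.2 == 2))
      = ((rest.any (fun p => p.2 == 2)) || pvG d0 n t) := by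
  intro d0 n rest
  induction t generalizing d0 n rest with
  | nil => simp [pvG, Bool.or_comm]
  | cons d t ih =>
    simp only [List.foldl_cons, pvRunStep, pvG]
    by_cases h : d = d0
    · subst h
      rw [if_pos (by simp : (d == d) = true), if_pos (by simp : (d == d) = true), ih]
    · rw [if_neg (by simp [Ne.symm h] : ¬ (d0 == d) = true),
        if_neg (by simp [h] : ¬ (d == d0) = true), ih]
      simp only [List.any_cons]
      cases rest.any (fun p => p.2 == 2) <;> cases (n == 2 : Bool) <;> simp

-- (Z) Source B's zip check = the structural decrease test
theorem pvZip_eq (l : List Int) :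
    ((l.zip (l.drop 1)).any (fun p => decide (p.1 > p.2))) = pvHasDec l := by
  match l with
  | [] => rfl
  | [a] => rfl
  | a :: b :: t =>
    have ih := pvZip_eq (b :: t)
    simp only [pvHasDec, List.drop_succ_cons, List.drop_zero, List.zip_cons_cons, List.any_cons] at *
    rw [← ih]

-- ===== VERDICT (by name: the statement is the Claim_ definition above) =====
theorem meets_criteria_part2_spec : Claim_equal_meets_criteria_part2 := by
  intro num _ _
  unfold Spec_meets_criteria_part2 meets_criteria_part2 meets_criteria_part2_alt
  rw [pvLoopA_eq_aux (PySem.Int.toStr num).toList 0 false (by omega)]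
  simp only [if_pos rfl, Nat.cast_zero, List.drop_zero]
  rw [pvAux_eq]
  show _ = (if ((pvDigits num).zip ((pvDigits num).drop 1)).any (fun p => decide (p.1 > p.2)) = true
      then false else ((pvDigits num).foldl pvRunStep []).any (fun p => p.2 == 2))
  rw [pvZip_eq]
  unfold pvDigits
  rcases hds : (PySem.Int.toStr num).toList.map pvDig with _ | ⟨d, t⟩
  · simp [pvEx2, List.foldl]
  · rw [show List.foldl pvRunStep [] (d :: t) = List.foldl pvRunStep [(d, 1)] t from rfl,
      pvFold_eq t d 1 []]
    simp only [List.any_nil, Bool.false_or]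
    rw [pvG_eq t d 1]
    show (if pvHasDec (d :: t) = true then false else false || pvEx2 none (d :: t)) = _
    rw [show pvEx2 none (d :: t) = (pvCond none d t || pvEx2 (some d) t) from rfl,
      pvCond_fresh none d t (by simp)]
    rfl
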